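-- pv_equiv track=rewrite | github.com/NateshReddy/HexGame-PPO | fhtw_hex/reward_utils_old.py | is_blocking_move
-- ===== SOURCE A (Python) =====
-- def is_blocking_move(board, action_coordinates, player):
--     opponent = -player
--     row, col = action_coordinates
--     size = len(board)
--     directions = [(-1, 0), (1, 0), (0, -1), (0, 1), (-1, 1), (1, -1)]
--
--     for dr, dc in directions:
--         r1, c1 = row + dr, col + dc
--         r2, c2 = row - dr, col - dc
--         if (0 <= r1 < size and 0 <= c1 < size and board[r1][c1] == opponent) and \
--                 (0 <= r2 < size and 0 <= c2 < size and board[r2][c2] == opponent):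
--             return True
--     return False
-- ===== SOURCE B (Python) =====
-- def is_blocking_move(board, action_coordinates, player):
--     opponent = -player
--     row, col = action_coordinates
--     size = len(board)
--     offsets = [(-1, 0), (1, 0), (0, -1), (0, 1), (-1, 1), (1, -1)]
--     occ = {(row + dr, col + dc)
--            for dr, dc in offsets
--            if 0 <= row + dr < size and 0 <= col + dc < size
--            and board[row + dr][col + dc] == opponent}
--     return any((2 * row - r, 2 * col - c) in occ for (r, c) in occ)
-- ===== Notes on version B (the rewrite author's own statement) =====
-- stated objective: alternative
-- what changed: B first builds the set of in-bounds opponent-occupied neighbour cells in one comprehension, then returns whether any collected cell's antipode across the move is also in the set, instead of A's single loop probing both ends of each axis inline with an early return.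
-- outside the precondition, e.g. on is_blocking_move([[-1, 0, 0], [0], [-1, 0, 0]], (1, 0), 1): A returns True, B raises IndexError
import Mathlib
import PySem

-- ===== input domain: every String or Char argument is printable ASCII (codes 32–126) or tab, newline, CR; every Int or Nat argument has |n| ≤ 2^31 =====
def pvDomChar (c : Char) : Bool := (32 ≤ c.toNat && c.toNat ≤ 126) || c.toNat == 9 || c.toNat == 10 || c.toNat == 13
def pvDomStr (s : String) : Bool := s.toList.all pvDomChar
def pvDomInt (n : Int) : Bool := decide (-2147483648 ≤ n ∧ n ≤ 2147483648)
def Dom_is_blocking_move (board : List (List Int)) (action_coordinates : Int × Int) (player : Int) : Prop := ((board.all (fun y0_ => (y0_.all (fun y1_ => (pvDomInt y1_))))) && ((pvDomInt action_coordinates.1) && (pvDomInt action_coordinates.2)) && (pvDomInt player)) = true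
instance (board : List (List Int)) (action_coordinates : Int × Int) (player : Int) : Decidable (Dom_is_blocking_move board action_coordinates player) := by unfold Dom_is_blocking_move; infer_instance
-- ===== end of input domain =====

-- B builds the set of in-bounds opponent-occupied neighbour cells first and then tests
-- antipodal membership in that set, instead of A's inline two-ended probe per direction
-- (objective: alternative, same behaviour on Pre_).

-- ===== PORT A =====
-- board[r][c] == opponent guarded by A's inline bounds check (total rendering; under
-- Pre_ the pyGet? calls never return none once the bounds guard holds)
def pvProbeA (board : List (List Int)) (size r c opp : Int) : Bool :=
  decide (0 ≤ r) && decide (r < size) && decide (0 ≤ c) && decide (c < size) &&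
    (((PySem.List.pyGet? board r).bind (fun rw => PySem.List.pyGet? rw c)) == some opp)

-- A's for-loop with early return over the direction list
def pvLoopA (board : List (List Int)) (size row col opp : Int) :
    List (Int × Int) → Bool
  | [] => false
  | (dr, dc) :: rest =>
    if pvProbeA board size (row + dr) (col + dc) opp &&
       pvProbeA board size (row - dr) (col - dc) opp then
      true
    else
      pvLoopA board size row col opp rest

def is_blocking_move (board : List (List Int)) (action_coordinates : Int × Int) (player : Int) : Bool :=
  let opponent := -player
  let row := action_coordinates.1
  let col := action_coordinates.2
  let size : Int := board.length
  pvLoopA board size row col opponent [(-1, 0), (1, 0), (0, -1), (0, 1), (-1, 1), (1, -1)]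

-- ===== PORT B =====
def is_blocking_move_alt (board : List (List Int)) (action_coordinates : Int × Int) (player : Int) : Bool :=
  let opponent := -player
  let row := action_coordinates.1
  let col := action_coordinates.2
  let size : Int := board.length
  let offsets : List (Int × Int) := [(-1, 0), (1, 0), (0, -1), (0, 1), (-1, 1), (1, -1)]
  -- set comprehension: in-bounds neighbour cells holding the opponent
  let occ : PySem.Set (Int × Int) :=
    PySem.Set.ofList
      ((offsets.filter (fun d =>
          decide (0 ≤ row + d.1) && decide (row + d.1 < size) &&
          decide (0 ≤ col + d.2) && decide (col + d.2 < size) &&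
          (((PySem.List.pyGet? board (row + d.1)).bind
              (fun rw => PySem.List.pyGet? rw (col + d.2))) == some opponent))).map
        (fun d => (row + d.1, col + d.2)))
  -- any(...): order-independent consumption of the set
  occ.any (fun x => PySem.Set.contains occ (2 * row - x.1, 2 * col - x.2))

-- ===== PRECONDITION & SPEC =====
-- Pre_ excludes inputs where a probed neighbour cell (r,c) passes the 0<=r,c<size
-- bounds check but its (ragged) row is shorter than c+1: there board[r][c] can raise
-- IndexError in A (and in B); if A returns True on an earlier direction before
-- reaching such a cell it still returns, and B raises there (see cites).
def Pre_is_blocking_move (board : List (List Int)) (action_coordinates : Int × Int) (player : Int) : Prop :=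
  ∀ d ∈ ([(-1, 0), (1, 0), (0, -1), (0, 1), (-1, 1), (1, -1)] : List (Int × Int)),
    (0 ≤ action_coordinates.1 + d.1 ∧ action_coordinates.1 + d.1 < (board.length : Int) ∧
     0 ≤ action_coordinates.2 + d.2 ∧ action_coordinates.2 + d.2 < (board.length : Int)) →
    action_coordinates.2 + d.2 <
      ((((PySem.List.pyGet? board (action_coordinates.1 + d.1)).getD []).length : Int))

instance (board : List (List Int)) (action_coordinates : Int × Int) (player : Int) : Decidable (Pre_is_blocking_move board action_coordinates player) := by unfold Pre_is_blocking_move; infer_instance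

def pvWitness_is_blocking_move : List (List Int) × (Int × Int) × Int :=
  ([[0, -1], [-1, 0]], (0, 0), 1)

def Spec_is_blocking_move (board : List (List Int)) (action_coordinates : Int × Int) (player : Int) (out : Bool) : Prop := out = is_blocking_move_alt board action_coordinates player
instance (board : List (List Int)) (action_coordinates : Int × Int) (player : Int) (out : Bool) : Decidable (Spec_is_blocking_move board action_coordinates player out) := by unfold Spec_is_blocking_move; infer_instance

-- ===== CLAIM (what is proved, stated in full; the proofs are below) =====
def Claim_equal_is_blocking_move : Prop := ∀ (board : List (List Int)) (action_coordinates : Int × Int) (player : Int), Dom_is_blocking_move board action_coordinates player → Pre_is_blocking_move board action_coordinates player → Spec_is_blocking_move board action_coordinates player (is_blocking_move board action_coordinates player)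

-- ===== LEMMAS AND PROOFS =====

-- A's early-return loop is List.any of the two-ended probe
theorem pvLoopA_eq_any (board : List (List Int)) (size row col opp : Int)
    (l : List (Int × Int)) :
    pvLoopA board size row col opp l =
      l.any (fun d =>
        pvProbeA board size (row + d.1) (col + d.2) opp &&
        pvProbeA board size (row - d.1) (col - d.2) opp) := by
  induction l with
  | nil => rfl
  | cons d rest ih =>
    obtain ⟨dr, dc⟩ := d
    simp only [pvLoopA, List.any_cons, ih]
    by_cases h : (pvProbeA board size (row + dr) (col + dc) opp &&
        pvProbeA board size (row - dr) (col - dc) opp) = true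
    · simp [h]
    · simp [h]

-- the core equivalence, generalized over any probe P and any direction list closed
-- under negation
theorem pv_core (P : Int × Int → Bool) (row col : Int) (l : List (Int × Int))
    (hcl : ∀ d ∈ l, (-d.1, -d.2) ∈ l) :
    (l.any (fun d => P d && P (-d.1, -d.2))) =
      (let L := (l.filter P).map (fun d => (row + d.1, col + d.2))
       (PySem.Set.ofList L).any
         (fun x => PySem.Set.contains (PySem.Set.ofList L) (2 * row - x.1, 2 * col - x.2))) := by
  simp only []
  apply Bool.eq_iff_iff.mpr
  simp only [List.any_eq_true, PySem.Set.mem_ofList, PySem.Set.contains_iff,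
    List.mem_map, List.mem_filter, Bool.and_eq_true]
  constructor
  · rintro ⟨d, hd, hP, hPn⟩
    refine ⟨(row + d.1, col + d.2), ⟨d, ⟨hd, hP⟩, rfl⟩, ?_⟩
    refine ⟨(-d.1, -d.2), ⟨hcl d hd, hPn⟩, ?_⟩
    simp only [Prod.mk.injEq]
    constructor <;> ring
  · rintro ⟨x, ⟨d, ⟨hd, hP⟩, rfl⟩, ⟨d', ⟨hd', hP'⟩, he⟩⟩
    have h1 : d'.1 = -d.1 ∧ d'.2 = -d.2 := by
      have := congrArg Prod.fst he
      have := congrArg Prod.snd he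
      constructor <;> omega
    refine ⟨d, hd, hP, ?_⟩
    have : (-d.1, -d.2) = d' := by
      obtain ⟨a, b⟩ := h1; obtain ⟨u, v⟩ := d'
      simp_all
    rwa [this]

-- ===== VERDICT (by name: the statement is the Claim_ definition above) =====
theorem is_blocking_move_spec : Claim_equal_is_blocking_move := by
  intro board ac player _ _
  unfold Spec_is_blocking_move is_blocking_move is_blocking_move_alt
  simp only []
  rw [pvLoopA_eq_any]
  have h := pv_core
    (fun d =>
      decide (0 ≤ ac.1 + d.1) && decide (ac.1 + d.1 < (board.length : Int)) &&
      decide (0 ≤ ac.2 + d.2) && decide (ac.2 + d.2 < (board.length : Int)) &&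
      (((PySem.List.pyGet? board (ac.1 + d.1)).bind
          (fun rw => PySem.List.pyGet? rw (ac.2 + d.2))) == some (-player)))
    ac.1 ac.2 [(-1, 0), (1, 0), (0, -1), (0, 1), (-1, 1), (1, -1)]
    (by decide)
  simp only [] at h
  rw [← h]
  refine List.any_congr rfl (fun d => ?_)
  have e1 : ac.1 - d.1 = ac.1 + -d.1 := by ring
  have e2 : ac.2 - d.2 = ac.2 + -d.2 := by ring
  simp only [pvProbeA, e1, e2]
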